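-- pv_equiv track=rewrite | github.com/ShivaShaklya/MarketEye | Review_collection/raw_amazon_laptops_processing.py | split_clauses
-- ===== SOURCE A (Python) =====
-- CONTRAST_WORDS = {"but", "however", "although", "though", "yet"}
--
-- def split_clauses(sentence):
--     words = sentence.split()
--     clauses, current = [], []
--
--     for w in words:
--         if w.lower() in CONTRAST_WORDS:
--             if current:
--                 clauses.append(" ".join(current))
--             current = []
--         else:
--             current.append(w)
--
--     if current:
--         clauses.append(" ".join(current))
--
--     return clauses
-- ===== SOURCE B (Python) =====
-- CONTRAST_WORDS = {"but", "however", "although", "though", "yet"}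
--
-- def split_clauses(sentence):
--     # Run-scanner: recursively peel maximal runs of non-contrast words,
--     # skipping contrast words, instead of an accumulator that is flushed.
--     def runs(ws):
--         if not ws:
--             return []
--         if ws[0].lower() in CONTRAST_WORDS:
--             return runs(ws[1:])
--         j = 1
--         while j < len(ws) and ws[j].lower() not in CONTRAST_WORDS:
--             j += 1
--         return [" ".join(ws[:j])] + runs(ws[j:])
--     return runs(sentence.split())
-- ===== Notes on version B (the rewrite author's own statement) =====
-- stated objective: alternative
-- what changed: Replaces the accumulator-and-flush loop (current list appended word by word, flushed at each contrast word and at the end) with a run scanner that recursively peels each maximal run of non-contrast words and joins it directly, so no pending-clause state exists.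
import Mathlib
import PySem

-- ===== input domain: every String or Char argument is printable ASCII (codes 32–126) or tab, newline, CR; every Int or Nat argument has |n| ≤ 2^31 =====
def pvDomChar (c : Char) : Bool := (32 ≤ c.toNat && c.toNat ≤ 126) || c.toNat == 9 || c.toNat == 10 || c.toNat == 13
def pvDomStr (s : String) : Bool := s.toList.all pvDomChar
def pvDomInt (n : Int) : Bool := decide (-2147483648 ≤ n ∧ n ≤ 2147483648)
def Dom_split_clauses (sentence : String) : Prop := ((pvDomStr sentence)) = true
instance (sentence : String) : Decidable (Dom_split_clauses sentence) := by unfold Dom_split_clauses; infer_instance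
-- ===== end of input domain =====

-- B rewrites A's accumulator-and-flush loop as a run scanner over maximal runs of
-- non-contrast words (objective: alternative; same linear cost, no pending state).

-- shared module constant: CONTRAST_WORDS = {"but", "however", "although", "though", "yet"}
def contrastWords : PySem.Set String :=
  PySem.Set.ofList ["but", "however", "although", "though", "yet"]

-- w.lower() in CONTRAST_WORDS (used verbatim by both Pythons)
def isContrast (w : String) : Bool := PySem.Set.contains contrastWords (PySem.Str.lower w)

-- ===== PORT A =====
-- one loop iteration over state (clauses, current)
def stepA (st : List String × List String) (w : String) : List String × List String :=
  if isContrast w then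
    (if st.2 ≠ [] then st.1 ++ [PySem.Str.join " " st.2] else st.1, [])
  else
    (st.1, st.2 ++ [w])

def split_clauses (sentence : String) : List String :=
  let words := PySem.Str.split₀ sentence
  let st := words.foldl stepA ([], [])
  if st.2 ≠ [] then st.1 ++ [PySem.Str.join " " st.2] else st.1

-- ===== PORT B =====
-- B's inner while loop computes the maximal leading run of non-contrast words:
-- ws[:j] / ws[j:] = takeWhile / dropWhile of (not contrast)
def runsB : List String → List String
  | [] => []
  | w :: ws =>
    if isContrast w then runsB ws
    else
      PySem.Str.join " " (w :: ws.takeWhile (fun x => !isContrast x)) ::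
        runsB (ws.dropWhile (fun x => !isContrast x))
termination_by ws => ws.length
decreasing_by
  all_goals
    have := List.length_dropWhile_le (fun x => !isContrast x) ws
    simp only [List.length_cons]
    omega

def split_clauses_alt (sentence : String) : List String :=
  runsB (PySem.Str.split₀ sentence)

-- ===== PRECONDITION & SPEC =====
def Spec_split_clauses (sentence : String) (out : List String) : Prop := out = split_clauses_alt sentence
instance (sentence : String) (out : List String) : Decidable (Spec_split_clauses sentence out) := by unfold Spec_split_clauses; infer_instance

-- ===== CLAIM (what is proved, stated in full; the proofs are below) =====
def Claim_equal_split_clauses : Prop := ∀ (sentence : String), Dom_split_clauses sentence → Spec_split_clauses sentence (split_clauses sentence)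

-- ===== LEMMAS AND PROOFS =====

-- proof-side direct recursion describing A's loop with pending clause `cur`
def runAux (cur : List String) : List String → List String
  | [] => if cur = [] then [] else [PySem.Str.join " " cur]
  | w :: ws =>
    if isContrast w then
      (if cur = [] then [] else [PySem.Str.join " " cur]) ++ runAux [] ws
    else
      runAux (cur ++ [w]) ws

-- A's fold-and-flush equals runAux
theorem foldA_eq_runAux (words : List String) :
    ∀ (clauses cur : List String),
      (let st := words.foldl stepA (clauses, cur);
       if st.2 ≠ [] then st.1 ++ [PySem.Str.join " " st.2] else st.1)
      = clauses ++ runAux cur words := by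
  induction words with
  | nil =>
    intro clauses cur
    by_cases h : cur = [] <;> simp [runAux, h]
  | cons w ws ih =>
    intro clauses cur
    by_cases h : isContrast w
    · by_cases hc : cur = [] <;>
        simp [stepA, h, hc, runAux, ih, List.append_assoc]
    · simp [stepA, h, runAux, ih]

-- a nonempty pending clause absorbs the leading non-contrast run
theorem runAux_pending (ws : List String) :
    ∀ (cur : List String), cur ≠ [] →
      runAux cur ws
      = PySem.Str.join " " (cur ++ ws.takeWhile (fun x => !isContrast x)) ::
          runAux [] (ws.dropWhile (fun x => !isContrast x)) := by
  induction ws with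
  | nil => intro cur hc; simp [runAux, hc]
  | cons x ws ih =>
    intro cur hc
    by_cases h : isContrast x
    · simp [runAux, h, hc]
    · have hne : cur ++ [x] ≠ [] := by simp
      simp [runAux, h, ih (cur ++ [x]) hne]

-- runAux with empty pending clause is exactly B's run scanner
theorem runAux_nil_eq_runsB : ∀ (ws : List String), runAux [] ws = runsB ws
  | [] => by simp [runAux, runsB]
  | w :: ws => by
    by_cases h : isContrast w
    · simp [runAux, runsB, h, runAux_nil_eq_runsB ws]
    · have hd := runAux_nil_eq_runsB (ws.dropWhile (fun x => !isContrast x))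
      simp [runAux, runsB, h, runAux_pending ws [w] (by simp), hd]
termination_by ws => ws.length
decreasing_by
  all_goals
    have := List.length_dropWhile_le (fun x => !isContrast x) ws
    simp only [List.length_cons]
    omega

-- ===== VERDICT (by name: the statement is the Claim_ definition above) =====
theorem split_clauses_spec : Claim_equal_split_clauses := by
  intro sentence _
  unfold Spec_split_clauses split_clauses split_clauses_alt
  have h := foldA_eq_runAux (PySem.Str.split₀ sentence) [] []
  simpa [runAux_nil_eq_runsB] using h
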